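-- pv_equiv track=rewrite | github.com/mcgaw/psychic-garbanzo | 5/week3/budget_allocation/budget_allocation.py | combine
-- ===== SOURCE A (Python) =====
-- def combine(m, n):
--     a = len(m)
--     c = []
--     count = 0
--     for i in range(a):
--         if(m[i] == n[i]):
--             c.append(m[i])
--         elif(m[i] != n[i]):
--             c.append('-')
--             count += 1
--
--     if(count > 1):
--         return None
--     else:
--         return c
-- ===== SOURCE B (Python) =====
-- def combine(m, n):
--     # Structural recursion over both lists with short-circuit: stop at the
--     # second mismatch instead of scanning to the end and counting.
--     def go(ms, ns, seen):
--         if not ms: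
--             return []
--         if ms[0] == ns[0]:
--             rest = go(ms[1:], ns[1:], seen)
--             return None if rest is None else [ms[0]] + rest
--         if seen:
--             return None
--         rest = go(ms[1:], ns[1:], True)
--         return None if rest is None else ['-'] + rest
--     return go(m, n, False)
-- ===== Notes on version B (the rewrite author's own statement) =====
-- stated objective: alternative
-- what changed: B replaces A's index loop with a mismatch counter by structural recursion over both lists carrying a one-bit 'seen a mismatch' flag, short-circuiting to None at the second mismatch instead of scanning the rest and counting.
import Mathlib
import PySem

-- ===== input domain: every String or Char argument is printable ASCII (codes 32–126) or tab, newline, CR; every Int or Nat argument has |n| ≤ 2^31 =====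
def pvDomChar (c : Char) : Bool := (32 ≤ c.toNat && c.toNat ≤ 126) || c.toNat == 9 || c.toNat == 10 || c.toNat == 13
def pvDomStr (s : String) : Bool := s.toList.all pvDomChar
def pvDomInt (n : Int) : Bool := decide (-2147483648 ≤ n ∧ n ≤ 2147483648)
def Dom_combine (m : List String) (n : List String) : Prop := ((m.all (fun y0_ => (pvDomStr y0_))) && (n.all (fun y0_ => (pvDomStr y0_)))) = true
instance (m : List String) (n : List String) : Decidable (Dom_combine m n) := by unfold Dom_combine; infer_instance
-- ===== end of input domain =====

-- B replaces A's index loop + mismatch counter by structural recursion over both lists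
-- with a one-bit 'seen a mismatch' flag that short-circuits at the second mismatch.

-- ===== PORT A =====
-- the body of A's for-loop over i in range(len(m))
def combineStep (m : List String) (n : List String) (st : List String × Int) (i : Int) : List String × Int :=
  let mi := PySem.List.pyGetD m i ""
  let ni := PySem.List.pyGetD n i ""
  if mi == ni then (st.1 ++ [mi], st.2)
  else if mi != ni then (st.1 ++ ["-"], st.2 + 1)
  else st

def combine (m : List String) (n : List String) : Option (List String) :=
  let a : Int := (m.length : Int)
  let st := (PySem.List.pyRange 0 a 1).foldl (combineStep m n) ([], 0)
  if st.2 > 1 then none else some st.1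

-- ===== PORT B =====
-- B's inner recursive helper 'go(ms, ns, seen)'; ns[0] (an IndexError when ns is
-- empty while ms is not) is excluded by Pre_combine, ported as head-getD.
def combineAltGo : List String → List String → Bool → Option (List String)
  | [], _, _ => some []
  | x :: ms, ns, seen =>
      let y := PySem.List.pyGetD ns 0 ""
      if x == y then
        match combineAltGo ms (ns.drop 1) seen with
        | none => none
        | some rest => some (x :: rest)
      else if seen then none
      else
        match combineAltGo ms (ns.drop 1) true with
        | none => none
        | some rest => some ("-" :: rest)

def combine_alt (m : List String) (n : List String) : Option (List String) :=
  combineAltGo m n false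

-- ===== PRECONDITION & SPEC =====
-- Python A raises IndexError on n[i] when n is shorter than m; exactly those inputs are excluded.
def Pre_combine (m : List String) (n : List String) : Prop := m.length ≤ n.length
instance (m : List String) (n : List String) : Decidable (Pre_combine m n) := by unfold Pre_combine; infer_instance
def pvWitness_combine : List String × List String := (["a", "b"], ["a", "c"])

def Spec_combine (m : List String) (n : List String) (out : Option (List String)) : Prop := out = combine_alt m n
instance (m : List String) (n : List String) (out : Option (List String)) : Decidable (Spec_combine m n out) := by unfold Spec_combine; infer_instance

-- ===== CLAIM (what is proved, stated in full; the proofs are below) =====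
def Claim_equal_combine : Prop := ∀ (m : List String) (n : List String), Dom_combine m n → Pre_combine m n → Spec_combine m n (combine m n)

-- ===== LEMMAS AND PROOFS =====

-- common normal form both ports are reduced to
def combineMerged (m n : List String) : List String :=
  (m.zip n).map (fun p => if p.1 == p.2 then p.1 else "-")

def combineMis (m n : List String) : Nat :=
  (m.zip n).countP (fun p => p.1 != p.2)

theorem combineStep_eq (m n : List String) (c : List String) (k : Int) (i : Int)
    (h : PySem.List.pyGetD m i "" = PySem.List.pyGetD n i "") :
    combineStep m n (c, k) i = (c ++ [PySem.List.pyGetD m i ""], k) := by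
  simp [combineStep, h]

theorem combineStep_ne (m n : List String) (c : List String) (k : Int) (i : Int)
    (h : ¬ PySem.List.pyGetD m i "" = PySem.List.pyGetD n i "") :
    combineStep m n (c, k) i = (c ++ ["-"], k + 1) := by
  simp [combineStep, h]

-- A's loop, over an arbitrary index list: it appends the per-index merged value and counts mismatches.
theorem combine_foldA (m n : List String) (L : List Int) (c0 : List String) (k0 : Int) :
    L.foldl (combineStep m n) (c0, k0)
    = (c0 ++ L.map (fun i => if PySem.List.pyGetD m i "" == PySem.List.pyGetD n i ""
                              then PySem.List.pyGetD m i "" else "-"),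
       k0 + (L.countP (fun i => PySem.List.pyGetD m i "" != PySem.List.pyGetD n i "") : Int)) := by
  induction L generalizing c0 k0 with
  | nil => simp
  | cons x xs ih =>
      rw [List.foldl_cons]
      by_cases h : PySem.List.pyGetD m x "" = PySem.List.pyGetD n x ""
      · rw [combineStep_eq m n c0 k0 x h, ih]
        simp [h]
      · rw [combineStep_ne m n c0 k0 x h, ih]
        refine Prod.ext ?_ ?_
        · simp [h]
        · simp only [List.countP_cons]
          have hx : (PySem.List.pyGetD m x "" != PySem.List.pyGetD n x "") = true := by
            simpa using h
          simp only [hx, if_true]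
          push_cast
          ring

-- the index list mapped to the pairs it reads is exactly zip (under the length hypothesis)
theorem combine_pairs (m n : List String) (h : m.length ≤ n.length) :
    (PySem.List.pyRange 0 (m.length : Int) 1).map
      (fun i => (PySem.List.pyGetD m i "", PySem.List.pyGetD n i "")) = m.zip n := by
  apply List.ext_getElem
  · simp [PySem.List.length_pyRange_one]
    omega
  · intro k hk1 hk2
    have hkm : k < m.length := by
      simpa [PySem.List.length_pyRange_one] using hk1
    have hkn : k < n.length := by omega
    rw [List.getElem_map, PySem.List.getElem_pyRange_one]
    simp [PySem.List.pyGetD_natCast, List.getD_eq_getElem?_getD,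
          List.getElem?_eq_getElem hkm, List.getElem?_eq_getElem hkn]

-- A in normal form
theorem combine_normal (m n : List String) (h : m.length ≤ n.length) :
    combine m n = if combineMis m n > 1 then none else some (combineMerged m n) := by
  show (if ((PySem.List.pyRange 0 (m.length : Int) 1).foldl (combineStep m n) ([], 0)).2 > 1
        then none
        else some ((PySem.List.pyRange 0 (m.length : Int) 1).foldl (combineStep m n) ([], 0)).1) = _
  rw [combine_foldA m n _ [] 0]
  have hpairs := combine_pairs m n h
  have hmap : (PySem.List.pyRange 0 (m.length : Int) 1).map
      (fun i => if PySem.List.pyGetD m i "" == PySem.List.pyGetD n i ""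
                then PySem.List.pyGetD m i "" else "-") = combineMerged m n := by
    rw [combineMerged, ← hpairs, List.map_map]
    rfl
  have hcnt : (PySem.List.pyRange 0 (m.length : Int) 1).countP
      (fun i => PySem.List.pyGetD m i "" != PySem.List.pyGetD n i "") = combineMis m n := by
    rw [combineMis, ← hpairs, List.countP_map]
    rfl
  simp only [hmap, hcnt, List.nil_append, zero_add]
  by_cases hb : combineMis m n > 1
  · rw [if_pos (by exact_mod_cast hb), if_pos hb]
  · rw [if_neg (by exact_mod_cast hb), if_neg hb]

-- B in normal form: the flag contributes one to the budget
theorem combineAltGo_normal (m : List String) : ∀ (n : List String) (seen : Bool),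
    m.length ≤ n.length →
    combineAltGo m n seen
      = if combineMis m n + (if seen then 1 else 0) > 1 then none
        else some (combineMerged m n) := by
  induction m with
  | nil =>
      intro n seen _
      simp [combineAltGo, combineMis, combineMerged]
      split <;> omega
  | cons x ms ih =>
      intro n seen h
      match n with
      | [] => simp at h
      | y :: ns =>
        have hlen : ms.length ≤ ns.length := by simpa using h
        have hy : PySem.List.pyGetD (y :: ns) 0 "" = y := by
          simp
        by_cases hxy : x = y
        · rw [show combineAltGo (x :: ms) (y :: ns) seen
              = (match combineAltGo ms ns seen with
                 | none => none
                 | some rest => some (x :: rest)) by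
            simp [combineAltGo, hy, hxy]]
          rw [ih ns seen hlen]
          by_cases hb : combineMis ms ns + (if seen then 1 else 0) > 1
          · rw [if_pos hb]
            rw [if_pos (by simp [combineMis, hxy] at hb ⊢; omega)]
          · rw [if_neg hb]
            rw [if_neg (by simp [combineMis, hxy] at hb ⊢; omega)]
            simp [combineMerged, hxy]
        · cases seen with
          | true =>
              rw [show combineAltGo (x :: ms) (y :: ns) true = none by
                simp [combineAltGo, hy, hxy]]
              rw [if_pos (by simp [combineMis, hxy])]
          | false =>
              rw [show combineAltGo (x :: ms) (y :: ns) false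
                  = (match combineAltGo ms ns true with
                     | none => none
                     | some rest => some ("-" :: rest)) by
                simp [combineAltGo, hy, hxy]]
              rw [ih ns true hlen]
              by_cases hb : combineMis ms ns + 1 > 1
              · rw [if_pos (by simpa using hb)]
                rw [if_pos (by simp [combineMis, hxy] at hb ⊢; omega)]
              · rw [if_neg (by simpa using hb)]
                rw [if_neg (by simp [combineMis, hxy] at hb ⊢; omega)]
                simp [combineMerged, hxy]

-- ===== VERDICT (by name: the statement is the Claim_ definition above) =====
theorem combine_spec : Claim_equal_combine := by
  intro m n _ hpre
  unfold Spec_combine combine_alt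
  rw [combine_normal m n hpre, combineAltGo_normal m n false hpre]
  simp
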